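-- pv_equiv track=rewrite | github.com/suranjanc/lc | prisonBreak.py | relPrisoners
-- ===== SOURCE A (Python) =====
-- def relPrisoners(passedList):
--     if passedList[0]==0:
--         return(0)
--     countFreed=0
--     newlist=passedList.copy()
--     for i in range(len(passedList)):
--         if newlist[i]==1:
--             countFreed+=1
--             newlist=listToggle(newlist)
--     return(countFreed)
--
-- def listToggle(listName):
--     toggledList=[]
--     for i in range(len(listName)):
--         if listName[i]==0:
--             toggledList.append(1)
--         else:
--             toggledList.append(0)
--     return(toggledList)
-- ===== SOURCE B (Python) =====
-- def relPrisoners(passedList):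
--     if passedList[0] == 0:
--         return 0
--     if 1 not in passedList:
--         return 0
--     # Nothing changes until the first cell reading 1 frees its prisoner.
--     start = passedList.index(1)
--     count = 1
--     # Each release toggles every cell, and toggling maps 0 to 1 and any other
--     # value to 0: so after count >= 1 toggles a cell that originally held x
--     # reads 1 exactly when (x != 0) == (count is even).
--     for x in passedList[start + 1:]:
--         if (x != 0) == (count % 2 == 0):
--             count += 1
--     return count
-- ===== Notes on version B (the rewrite author's own statement) =====
-- stated objective: faster
-- what changed: B replaces A's repeated whole-list toggling (rebuilding the list on every freed prisoner) with one index() to find the first release plus a single pass over the remaining suffix that tracks only the release count's parity; Pre_ excludes only the empty list, on which A raises IndexError.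
import Mathlib
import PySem

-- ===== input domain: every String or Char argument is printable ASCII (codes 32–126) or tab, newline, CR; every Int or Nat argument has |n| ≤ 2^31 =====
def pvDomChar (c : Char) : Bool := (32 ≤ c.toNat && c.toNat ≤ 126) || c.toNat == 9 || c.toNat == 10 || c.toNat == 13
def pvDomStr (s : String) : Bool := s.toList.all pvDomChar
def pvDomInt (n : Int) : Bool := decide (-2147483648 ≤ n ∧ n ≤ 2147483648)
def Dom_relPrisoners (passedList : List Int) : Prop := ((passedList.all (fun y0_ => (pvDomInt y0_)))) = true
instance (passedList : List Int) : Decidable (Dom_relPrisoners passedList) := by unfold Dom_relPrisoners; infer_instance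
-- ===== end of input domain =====

-- B replaces A's repeated whole-list toggling with index() of the first 1 plus a
-- single parity-tracking pass over the suffix (objective: faster, one pass).

-- ===== PORT A =====
def listToggle (listName : List Int) : List Int :=
  listName.foldl (fun acc v => acc ++ [if v == 0 then (1 : Int) else 0]) []

def relPrisoners (passedList : List Int) : Int :=
  match PySem.List.pyGet? passedList 0 with
  | none => 0  -- IndexError in Python on []: excluded by Pre_
  | some h =>
    if h == 0 then 0
    else
      (PySem.List.pyRange 0 (passedList.length : Int) 1).foldl
        (fun (st : Int × List Int) i =>
          match PySem.List.pyGet? st.2 i with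
          | some v => if v == 1 then (st.1 + 1, listToggle st.2) else st
          | none => st)  -- never hit: listToggle preserves length
        (0, passedList) |>.1

-- ===== PORT B =====
def relPrisoners_alt (passedList : List Int) : Int :=
  match PySem.List.pyGet? passedList 0 with
  | none => 0  -- IndexError in Python on []: excluded by Pre_
  | some h =>
    if h == 0 then 0
    else
      match PySem.List.index? passedList 1 with
      | none => 0  -- '1 not in passedList'
      | some start =>
        (PySem.List.slice passedList (some ((start : Int) + 1)) none).foldl
          (fun (count : Int) x =>
            if (!(x == 0)) == (PySem.Int.mod count 2 == 0) then count + 1 else count)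
          1

-- ===== PRECONDITION & SPEC =====
-- Pre_ excludes only the empty list, on which Python A raises IndexError.
def Pre_relPrisoners (passedList : List Int) : Prop := passedList ≠ []
instance (passedList : List Int) : Decidable (Pre_relPrisoners passedList) := by unfold Pre_relPrisoners; infer_instance
def pvWitness_relPrisoners : List Int := [1, 0, 1, 0]

def Spec_relPrisoners (passedList : List Int) (out : Int) : Prop := out = relPrisoners_alt passedList
instance (passedList : List Int) (out : Int) : Decidable (Spec_relPrisoners passedList out) := by unfold Spec_relPrisoners; infer_instance

-- ===== CLAIM (what is proved, stated in full; the proofs are below) =====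
def Claim_equal_relPrisoners : Prop := ∀ (passedList : List Int), Dom_relPrisoners passedList → Pre_relPrisoners passedList → Spec_relPrisoners passedList (relPrisoners passedList)

-- ===== LEMMAS AND PROOFS =====

/-- A's loop body. -/
def stepA (st : Int × List Int) (i : Int) : Int × List Int :=
  match PySem.List.pyGet? st.2 i with
  | some v => if v == 1 then (st.1 + 1, listToggle st.2) else st
  | none => st

/-- B's loop body. -/
def stepB (count : Int) (x : Int) : Int :=
  if (!(x == 0)) == (PySem.Int.mod count 2 == 0) then count + 1 else count

/-- The element-wise flip that one `listToggle` performs. -/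
def togF (v : Int) : Int := if v == 0 then 1 else 0
/-- The element-wise effect of an even positive number of `listToggle`s. -/
def togG (v : Int) : Int := if v == 0 then 0 else 1

/-- The list A's loop holds after `c ≥ 1` toggles of the original `l`. -/
def togState (c : Nat) (l : List Int) : List Int :=
  if c % 2 = 1 then l.map togF else l.map togG

lemma listToggle_eq_map (m : List Int) : listToggle m = m.map togF := by
  unfold listToggle
  rw [PySem.List.foldl_append_singleton_eq_map]
  simp [togF]

lemma togF_togF (x : Int) : togF (togF x) = togG x := by
  by_cases h : x = 0 <;> simp [togF, togG, h]

lemma togF_togG (x : Int) : togF (togG x) = togF x := by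
  by_cases h : x = 0 <;> simp [togF, togG, h]

lemma listToggle_togState (c : Nat) (l : List Int) :
    listToggle (togState c l) = togState (c + 1) l := by
  rw [listToggle_eq_map]
  unfold togState
  by_cases hp : c % 2 = 1
  · rw [if_pos hp, if_neg (by omega : ¬ (c + 1) % 2 = 1), List.map_map]
    exact List.map_congr_left (fun x _ => togF_togF x)
  · rw [if_neg hp, if_pos (by omega : (c + 1) % 2 = 1), List.map_map]
    exact List.map_congr_left (fun x _ => togF_togG x)

lemma togState_length (c : Nat) (l : List Int) : (togState c l).length = l.length := by
  unfold togState; split_ifs <;> simp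

lemma togState_getElem (c : Nat) (l : List Int) (k : Nat) (hk : k < l.length) :
    (togState c l)[k]'(by rw [togState_length]; exact hk) =
      if c % 2 = 1 then togF l[k] else togG l[k] := by
  unfold togState; split_ifs <;> simp

/-- A's loop from index `k`, started in the state after `c ≥ 1` toggles, counts
    the same as B's pass over the remaining suffix started at count `c`. -/
lemma loop_tail (l : List Int) (n : Nat) : ∀ (k c : Nat), 1 ≤ c → l.length = k + n →
    ((PySem.List.pyRange (k : Int) (l.length : Int) 1).foldl stepA
        ((c : Int), togState c l)).1
    = (l.drop k).foldl stepB (c : Int) := by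
  induction n with
  | zero =>
    intro k c _ hk
    rw [PySem.List.pyRange_one_eq_nil (by omega), List.drop_eq_nil_of_le (by omega)]
    simp
  | succ n ih =>
    intro k c hc hk
    have hkl : k < l.length := by omega
    rw [PySem.List.pyRange_one_cons (by exact_mod_cast hkl),
        List.drop_eq_getElem_cons hkl]
    simp only [List.foldl_cons]
    have hget : PySem.List.pyGet? (togState c l) (k : Int) =
        some ((togState c l)[k]'(by rw [togState_length]; exact hkl)) := by
      rw [PySem.List.pyGet?_natCast]
      exact List.getElem?_eq_getElem _
    have hx := togState_getElem c l k hkl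
    set x := l[k] with hxdef
    -- the two step conditions agree for c ≥ 1
    have hcond : ((togState c l)[k]'(by rw [togState_length]; exact hkl) == 1) =
        ((!(x == 0)) == (PySem.Int.mod (c : Int) 2 == 0)) := by
      rw [hx]
      have hmod : (PySem.Int.mod (c : Int) 2 == 0) = (c % 2 == 0) := by
        rw [PySem.Int.mod_eq_emod_of_pos (by omega)]
        have h2 : ((c : Int) % 2) = ((c % 2 : Nat) : Int) := by push_cast; ring
        rw [h2]
        by_cases hp : c % 2 = 0 <;> simp [hp] <;> omega
      rw [hmod]
      by_cases hp : c % 2 = 1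
      · rw [if_pos hp, hp]
        by_cases hx0 : x = 0 <;> simp [togF, hx0]
      · rw [if_neg hp]
        have hp0 : c % 2 = 0 := by omega
        rw [hp0]
        by_cases hx0 : x = 0 <;> simp [togG, hx0]
    unfold stepA stepB
    rw [hget]
    simp only [hcond]
    by_cases hhit : ((!(x == 0)) == (PySem.Int.mod (c : Int) 2 == 0)) = true
    · rw [hhit]
      simp only [if_true, listToggle_togState]
      have : ((c : Int) + 1) = ((c + 1 : Nat) : Int) := by push_cast; ring
      rw [this]
      exact ih (k + 1) (c + 1) (by omega) (by omega)
    · rw [Bool.not_eq_true] at hhit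
      rw [hhit]
      simp only [Bool.false_eq_true, if_false]
      exact ih (k + 1) c hc (by omega)

/-- A's loop from index `k`, started untoggled at count 0, equals B's
    find-first-1-then-parity-pass over the suffix from `k`. -/
lemma loop_from (l : List Int) (n : Nat) : ∀ (k : Nat), l.length = k + n →
    ((PySem.List.pyRange (k : Int) (l.length : Int) 1).foldl stepA (0, l)).1
    = match PySem.List.index? (l.drop k) 1 with
      | none => 0
      | some s => (l.drop (k + s + 1)).foldl stepB 1 := by
  induction n with
  | zero =>
    intro k hk
    rw [PySem.List.pyRange_one_eq_nil (by omega), List.drop_eq_nil_of_le (by omega)]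
    simp [PySem.List.index?]
  | succ n ih =>
    intro k hk
    have hkl : k < l.length := by omega
    rw [PySem.List.pyRange_one_cons (by exact_mod_cast hkl),
        List.drop_eq_getElem_cons hkl]
    simp only [List.foldl_cons]
    have hget : PySem.List.pyGet? l (k : Int) = some l[k] := by
      rw [PySem.List.pyGet?_natCast]
      exact List.getElem?_eq_getElem _
    by_cases h1 : l[k] = 1
    · -- first release: A toggles once, count becomes 1
      simp only [h1]
      rw [PySem.List.index?_cons_self]
      simp only [stepA, hget, h1]
      simp only [BEq.rfl, if_true]
      have htog : listToggle l = togState 1 l := by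
        rw [listToggle_eq_map]; unfold togState; norm_num
      rw [htog]
      have := loop_tail l n (k + 1) 1 (by omega) (by omega)
      push_cast at this
      simpa using this
    · -- no release yet: state unchanged
      rw [PySem.List.index?_cons_of_ne (List.drop (k + 1) l) h1]
      have hstep : stepA (0, l) (k : Int) = (0, l) := by
        simp only [stepA, hget]
        simp [h1]
      rw [hstep]
      have := ih (k + 1) (by omega)
      push_cast at this
      rw [this]
      cases hidx : PySem.List.index? (l.drop (k + 1)) 1 with
      | none => simp
      | some s =>
        simp only [Option.map_some]
        have : k + 1 + s + 1 = k + (s + 1) + 1 := by omega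
        rw [this]

-- ===== VERDICT (by name: the statement is the Claim_ definition above) =====
theorem relPrisoners_spec : Claim_equal_relPrisoners := by
  intro l _ _
  unfold Spec_relPrisoners relPrisoners relPrisoners_alt
  cases hg : PySem.List.pyGet? l 0 with
  | none => rfl
  | some h =>
    simp only
    by_cases h0 : (h == 0) = true
    · rw [h0]; simp
    · rw [Bool.not_eq_true] at h0
      rw [h0]
      simp only [Bool.false_eq_true, if_false]
      have hA : (fun (st : Int × List Int) i =>
          match PySem.List.pyGet? st.2 i with
          | some v => if v == 1 then (st.1 + 1, listToggle st.2) else st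
          | none => st) = stepA := rfl
      have hB : (fun (count : Int) x =>
          if (!(x == 0)) == (PySem.Int.mod count 2 == 0) then count + 1 else count) = stepB := rfl
      rw [hA, hB]
      have := loop_from l l.length 0 (by omega)
      simp only [Nat.cast_zero, List.drop_zero] at this
      rw [this]
      cases hidx : PySem.List.index? l 1 with
      | none => simp
      | some start =>
        simp only
        have hs : PySem.List.slice l (some ((start : Int) + 1)) none = l.drop (start + 1) := by
          rw [show ((start : Int) + 1) = ((start + 1 : Nat) : Int) by push_cast; ring,
             PySem.List.slice_from_natCast]
        rw [hs]
        norm_num
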